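-- pv_equiv track=rewrite | github.com/Stasiche/Sber_NLP_news | inference.py | concat_shorts
-- ===== SOURCE A (Python) =====
-- from typing import List, Dict
--
-- def concat_shorts(texts: List[str]) -> List[str]:
--     res = [[texts[0]]]
--     for el in texts[1:]:
--         if len(el.split()) <= 5:
--             res[-1].append(el)
--         else:
--             res.append([el])
--     res = [''.join(el) for el in res]
--     return res
-- ===== SOURCE B (Python) =====
-- from typing import List, Dict
--
-- def concat_shorts(texts: List[str]) -> List[str]:
--     # Boundary-index decomposition: collect group-start indices, then join slices.
--     bounds = [0]
--     for i in range(1, len(texts)):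
--         if len(texts[i].split()) > 5:
--             bounds.append(i)
--     ends = bounds[1:] + [len(texts)]
--     return [''.join(texts[s:e]) for s, e in zip(bounds, ends)]
-- ===== Notes on version B (the rewrite author's own statement) =====
-- stated objective: alternative
-- what changed: Instead of A's single pass mutating a list-of-lists (appending each short text to the last group), B first computes the list of group-start indices (0 plus every index whose text has more than 5 words) and then joins one slice per consecutive boundary pair.
import Mathlib
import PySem

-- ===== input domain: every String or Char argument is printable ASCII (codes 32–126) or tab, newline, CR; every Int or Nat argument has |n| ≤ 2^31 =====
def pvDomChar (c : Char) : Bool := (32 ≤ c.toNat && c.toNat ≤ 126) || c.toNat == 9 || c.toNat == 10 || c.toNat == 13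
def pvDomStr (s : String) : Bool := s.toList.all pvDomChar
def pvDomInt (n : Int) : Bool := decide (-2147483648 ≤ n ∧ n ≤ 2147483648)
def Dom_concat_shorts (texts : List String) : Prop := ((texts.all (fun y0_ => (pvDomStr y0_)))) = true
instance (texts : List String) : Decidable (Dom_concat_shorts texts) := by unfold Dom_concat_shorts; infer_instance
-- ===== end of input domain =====

-- B replaces A's single pass mutating a list-of-lists with a boundary-index decomposition
-- (collect group-start indices, then join one slice per consecutive boundary pair); objective: alternative.

-- ===== PORT A =====
-- the loop body of A: if len(el.split()) <= 5: res[-1].append(el) else: res.append([el])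
def pvStepA (res : List (List String)) (el : String) : List (List String) :=
  if (PySem.Str.split₀ el).length ≤ 5 then
    res.dropLast ++ [(res.getLast?.getD []) ++ [el]]
  else
    res ++ [[el]]

def concat_shorts (texts : List String) : List String :=
  match PySem.List.pyGet? texts 0 with
  | none => []   -- texts[0] raises IndexError on empty input; excluded by Pre_
  | some t0 =>
    let res := (PySem.List.slice texts (some 1) none).foldl pvStepA [[t0]]
    res.map (fun el => PySem.Str.join "" el)

-- ===== PORT B =====
def concat_shorts_alt (texts : List String) : List String :=
  let n : Int := texts.length
  let bounds : List Int := (PySem.List.pyRange 1 n 1).foldl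
    (fun bs i =>
      -- texts[i] with 1 <= i < len(texts) is always in range, so the default is never used
      if (PySem.Str.split₀ (PySem.List.pyGetD texts i "")).length > 5 then bs ++ [i] else bs)
    [0]
  let ends := bounds.tail ++ [n]
  (bounds.zip ends).map (fun se => PySem.Str.join "" (PySem.List.slice texts (some se.1) (some se.2)))

-- ===== PRECONDITION & SPEC =====
-- Pre_ excludes only the empty list, on which A raises IndexError (texts[0]).
def Pre_concat_shorts (texts : List String) : Prop := texts ≠ []
instance (texts : List String) : Decidable (Pre_concat_shorts texts) := by unfold Pre_concat_shorts; infer_instance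
def pvWitness_concat_shorts : List String := (["one two three", "x"])

def Spec_concat_shorts (texts : List String) (out : List String) : Prop := out = concat_shorts_alt texts
instance (texts : List String) (out : List String) : Decidable (Spec_concat_shorts texts out) := by unfold Spec_concat_shorts; infer_instance

-- ===== CLAIM (what is proved, stated in full; the proofs are below) =====
def Claim_equal_concat_shorts : Prop := ∀ (texts : List String), Dom_concat_shorts texts → Pre_concat_shorts texts → Spec_concat_shorts texts (concat_shorts texts)

-- ===== LEMMAS AND PROOFS =====

-- A's grouping as a structural recursion (pending group p, remaining texts),
-- and B's grouping as slices between consecutive Nat boundaries.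
def pvF (p : List String) : List String → List (List String)
  | [] => [p]
  | x :: r => if (PySem.Str.split₀ x).length ≤ 5 then pvF (p ++ [x]) r else p :: pvF [x] r

def pvIdx (r : List String) : List Nat :=
  (List.range r.length).filter (fun k => (PySem.Str.split₀ (r.getD k "")).length > 5)

def pvSlicesN (ts : List String) (bs : List Nat) (n : Nat) : List (List String) :=
  (bs.zip (bs.tail ++ [n])).map (fun se => (ts.drop se.1).take (se.2 - se.1))

lemma pvIdx_cons (x : String) (r : List String) :
    pvIdx (x :: r) =
      (if (PySem.Str.split₀ x).length > 5 then [0] else []) ++ (pvIdx r).map (· + 1) := by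
  unfold pvIdx
  rw [List.length_cons, List.range_succ_eq_map, List.filter_cons, List.filter_map]
  simp [Function.comp_def, List.getD]
  split_ifs <;> rfl

lemma pvSlicesN_shift (p u : List String) (bs : List Nat) (m : Nat) :
    pvSlicesN (p ++ u) (bs.map (fun k => p.length + k)) (p.length + m) = pvSlicesN u bs m := by
  unfold pvSlicesN
  have h1 : (bs.map (fun k => p.length + k)).tail ++ [p.length + m]
      = (bs.tail ++ [m]).map (fun k => p.length + k) := by
    simp [List.map_tail]
  rw [h1, List.zip_map, List.map_map]
  apply List.map_congr_left
  intro a _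
  simp only [Function.comp_def, Prod.map]
  rw [List.drop_append]
  have h0 : p.length + a.1 - p.length = a.1 := by omega
  have h2 : List.drop (p.length + a.1) p = [] := List.drop_eq_nil_of_le (by omega)
  rw [h0, h2]
  simp only [List.nil_append]
  congr 1
  omega

lemma pvKey (r : List String) : ∀ (p : List String),
    pvSlicesN (p ++ r) (0 :: (pvIdx r).map (fun k => p.length + k)) (p.length + r.length)
      = pvF p r := by
  induction r with
  | nil =>
    intro p
    simp [pvSlicesN, pvIdx, pvF]
  | cons x r ih =>
    intro p
    rw [pvIdx_cons]
    by_cases h : (PySem.Str.split₀ x).length ≤ 5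
    · -- short x: fold it into the pending group
      rw [if_neg (by omega)]
      have hmap : ((pvIdx r).map (· + 1)).map (fun k => p.length + k)
          = (pvIdx r).map (fun k => (p ++ [x]).length + k) := by
        rw [List.map_map]; apply List.map_congr_left; intro a _
        simp; omega
      have hlist : p ++ x :: r = (p ++ [x]) ++ r := by simp
      have hlen : p.length + (x :: r).length = (p ++ [x]).length + r.length := by
        simp; omega
      simp only [List.nil_append, hmap, hlist, hlen, ih (p ++ [x])]
      rw [pvF, if_pos h]
    · -- long x: new group starts at index p.length
      rw [if_pos (by omega)]
      have hB : ([0] ++ (pvIdx r).map (· + 1)).map (fun k => p.length + k)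
          = p.length :: ((pvIdx r).map (· + 1)).map (fun k => p.length + k) := by
        simp
      rw [hB]
      have hsplit :
          pvSlicesN (p ++ x :: r)
            (0 :: p.length :: ((pvIdx r).map (· + 1)).map (fun k => p.length + k))
            (p.length + (x :: r).length)
          = ((p ++ x :: r).take p.length)
            :: pvSlicesN (p ++ x :: r)
                ((0 :: (pvIdx r).map (· + 1)).map (fun k => p.length + k))
                (p.length + (x :: r).length) := by
        unfold pvSlicesN
        simp
      rw [hsplit, List.take_left, pvSlicesN_shift]
      have hrest : pvSlicesN (x :: r) (0 :: (pvIdx r).map (· + 1)) (x :: r).length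
          = pvF [x] r := by
        have := ih [x]
        have hm : (pvIdx r).map (fun k => [x].length + k) = (pvIdx r).map (· + 1) := by
          apply List.map_congr_left; intro a _; simp; omega
        rw [hm] at this
        have hl : [x].length + r.length = (x :: r).length := by simp; omega
        rw [hl] at this
        simpa using this
      rw [hrest, pvF, if_neg h]

lemma pvF_foldl (r : List String) : ∀ (done : List (List String)) (p : List String),
    r.foldl pvStepA (done ++ [p]) = done ++ pvF p r := by
  induction r with
  | nil => intro done p; simp [pvF]
  | cons x r ih =>
    intro done p
    by_cases h : (PySem.Str.split₀ x).length ≤ 5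
    · have hstep : pvStepA (done ++ [p]) x = done ++ [p ++ [x]] := by
        simp [pvStepA, h]
      simp only [List.foldl_cons, hstep, ih done (p ++ [x]), pvF, if_pos h]
    · have hstep : pvStepA (done ++ [p]) x = (done ++ [p]) ++ [[x]] := by
        simp [pvStepA, h]
      simp only [List.foldl_cons, hstep, ih (done ++ [p]) [x], pvF, if_neg h]
      simp

lemma pvA_eq (t0 : String) (r : List String) :
    concat_shorts (t0 :: r) = (pvF [t0] r).map (fun el => PySem.Str.join "" el) := by
  unfold concat_shorts
  rw [show PySem.List.pyGet? (t0 :: r) 0 = some t0 by simp]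
  simp only [PySem.List.slice_from_one, List.tail_cons]
  rw [show ([[t0]] : List (List String)) = [] ++ [[t0]] by simp, pvF_foldl r [] [t0]]
  simp

lemma pvSlices_int (ts : List String) (bs : List Nat) (n : Nat) :
    ((bs.map (fun (k : Nat) => (k : Int))).zip ((bs.map (fun (k : Nat) => (k : Int))).tail ++ [(n : Int)])).map
      (fun se => PySem.Str.join "" (PySem.List.slice ts (some se.1) (some se.2)))
    = (pvSlicesN ts bs n).map (fun el => PySem.Str.join "" el) := by
  unfold pvSlicesN
  have h1 : (bs.map (fun (k : Nat) => (k : Int))).tail ++ [(n : Int)]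
      = (bs.tail ++ [n]).map (fun (k : Nat) => (k : Int)) := by
    rw [List.map_append, List.map_cons, List.map_nil, List.map_tail]
  rw [h1, List.zip_map, List.map_map, List.map_map]
  apply List.map_congr_left
  intro a _
  simp only [Function.comp_def, Prod.map]
  rw [PySem.List.slice_natCast]

lemma pvB_eq (t0 : String) (r : List String) :
    concat_shorts_alt (t0 :: r)
      = (pvSlicesN ([t0] ++ r) (0 :: (pvIdx r).map (fun k => 1 + k)) (1 + r.length)).map
          (fun el => PySem.Str.join "" el) := by
  simp only [concat_shorts_alt]
  rw [PySem.List.foldl_append_ite_eq_filter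
    (fun i => (PySem.Str.split₀ (PySem.List.pyGetD (t0 :: r) i "")).length > 5)]
  have hn : ((t0 :: r).length : Int) = ((1 + r.length : Nat) : Int) := by
    simp; omega
  have hrange : PySem.List.pyRange 1 ((t0 :: r).length : Int) 1
      = (List.range r.length).map (fun (k : Nat) => 1 + (k : Int)) := by
    rw [PySem.List.pyRange_one]
    congr 1
    simp
  rw [hrange, List.filter_map]
  have hfilt : (List.range r.length).filter
        ((fun i => decide ((PySem.Str.split₀ (PySem.List.pyGetD (t0 :: r) i "")).length > 5)) ∘
          (fun (k : Nat) => 1 + (k : Int)))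
      = pvIdx r := by
    unfold pvIdx
    apply List.filter_congr
    intro k _
    simp only [Function.comp_def]
    rw [show (1 : Int) + (k : Int) = ((k + 1 : Nat) : Int) by push_cast; omega]
    rw [PySem.List.pyGetD_natCast]
    simp [List.getD]
  rw [hfilt]
  have hb : ([(0 : Int)] ++ (pvIdx r).map ((fun (k : Nat) => 1 + (k : Int))))
      = ((0 :: (pvIdx r).map (fun k => 1 + k)).map (fun (k : Nat) => (k : Int))) := by
    rw [List.map_cons, List.map_map]
    apply congrArg (List.cons 0)
    apply List.map_congr_left
    intro a _
    simp
  rw [hb, hn, pvSlices_int]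
  simp

-- ===== VERDICT (by name: the statement is the Claim_ definition above) =====
theorem concat_shorts_spec : Claim_equal_concat_shorts := by
  intro texts _ hpre
  unfold Spec_concat_shorts
  match texts with
  | [] => exact absurd rfl hpre
  | t0 :: r =>
    rw [pvA_eq, pvB_eq]
    have h := pvKey r [t0]
    simp only [List.length_cons, List.length_nil, Nat.zero_add] at h
    rw [h]
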